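-- pv_equiv track=rewrite | github.com/arturoornelasb/tibia-bonelord-469-cipher | scripts/analysis/code_suspicion.py | dp_covered_positions
-- ===== SOURCE A (Python) =====
-- KNOWN = set([
--     'AB', 'AM', 'AN', 'ALS', 'AUF', 'AUS', 'BEI', 'DA', 'DAS', 'DEM',
--     'DEN', 'DER', 'DES', 'DIE', 'DU', 'ER', 'ES', 'IM', 'IN', 'IST',
--     'JA', 'MAN', 'OB', 'SO', 'UM', 'UND', 'VON', 'VOR', 'WO', 'ZU',
--     'EIN', 'ICH', 'SIE', 'WER', 'WIE', 'WAS', 'WIR',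
--     'GEH', 'GIB', 'HAT', 'HIN', 'HER', 'NUN', 'NUR', 'SEI', 'TUN',
--     'SAG', 'WAR', 'ODE', 'SER', 'GEN', 'INS', 'MIN', 'OEL', 'SCE',
--     'ABER', 'ALLE', 'ALLES', 'ALTE', 'ALTEN', 'ALTER', 'AUCH', 'BAND',
--     'BERG', 'BURG', 'DENN', 'DIES', 'DOCH', 'DORT', 'DREI', 'DURCH',
--     'EINE', 'EINEM', 'EINEN', 'EINER', 'EINES', 'ENDE', 'ERDE', 'ERST',
--     'ERSTE', 'FACH', 'FAND', 'FERN', 'FEST', 'FORT', 'GAR', 'GANZ',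
--     'GEGEN', 'GEIST', 'GOTT', 'GOLD', 'GRAB', 'GROSS', 'GRUFT', 'GUT',
--     'HAND', 'HEIM', 'HELD', 'HERR', 'HIER', 'HOCH', 'IMMER', 'KANN', 'KLAR',
--     'KRAFT', 'LAND', 'LANG', 'LICHT', 'MACHT', 'MEHR', 'MUSS', 'NACH',
--     'NACHT', 'NAHM', 'NAME', 'NEU', 'NEUE', 'NEUEN', 'NICHT', 'NIE', 'NOCH',
--     'ODER', 'ORT', 'ORTEN', 'REDE', 'REDEN', 'REICH', 'RIEF', 'RUIN', 'RUNE',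
--     'RUNEN', 'SAND', 'SAGT', 'SCHAUN', 'SCHON', 'SEHR', 'SEID', 'SEIN',
--     'SEINE', 'SEINEN', 'SEINER', 'SEINEM', 'SEINES', 'SICH', 'SIND', 'SOHN',
--     'SOLL', 'STEH', 'STEIN', 'STEINE', 'STEINEN', 'STERN', 'TAG', 'TAGE',
--     'TAT', 'TEIL', 'TIEF', 'TOD', 'TURM', 'UNTER', 'URALTE', 'VIEL', 'VIER',
--     'WAHR', 'WALD', 'WAND', 'WARD', 'WEIL', 'WELT', 'WENN', 'WERT',
--     'WESEN', 'WILL', 'WIND', 'WIRD', 'WORT', 'WORTE', 'ZEIT', 'ZEHN', 'ZORN',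
--     'FINDEN', 'GEBEN', 'GEHEN', 'HABEN', 'KOMMEN', 'LEBEN', 'LESEN',
--     'NEHMEN', 'SAGEN', 'SEHEN', 'STEHEN', 'SUCHEN', 'WISSEN', 'WISSET',
--     'RUFEN', 'WIEDER', 'GEIGET', 'BERUCHTIG', 'BERUCHTIGER', 'MEERE',
--     'NEIGT', 'WISTEN', 'MANIER', 'HUND', 'GODE', 'EIGENTUM', 'REDER',
--     'THENAEUT', 'LABT', 'MORT', 'DIGE', 'WEGE', 'KOENIGS', 'NAHE', 'NOT',
--     'NOTH', 'ZUR', 'OWI', 'ENGE', 'SEIDEN', 'ALTES', 'DENN', 'BIS', 'NIE',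
--     'NUT', 'NUTZ', 'HEIL', 'NEID', 'TREU', 'TREUE', 'SUN', 'DIENST', 'SANG',
--     'DINC', 'HULDE', 'STEINE', 'KOENIG', 'DASS', 'EDEL', 'ADEL',
--     'SALZBERG', 'WEICHSTEIN', 'ORANGENSTRASSE', 'GOTTDIENER', 'GOTTDIENERS',
--     'TRAUT', 'LEICH', 'HEIME', 'SCHARDT', 'NACH', 'LANT', 'HERRE',
-- ])
--
-- def dp_covered_positions(text):
--     """Returns set of positions covered by known words."""
--     n = len(text)
--     dp = [(0, None)] * (n + 1)
--     for i in range(1, n + 1):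
--         dp[i] = (dp[i-1][0], None)
--         for wlen in range(2, min(i, 20) + 1):
--             start = i - wlen
--             cand = text[start:i]
--             if cand in KNOWN:
--                 score = dp[start][0] + wlen
--                 if score > dp[i][0]:
--                     dp[i] = (score, (start, cand))
--     covered = set()
--     i = n
--     while i > 0:
--         if dp[i][1] is not None:
--             start, word = dp[i][1]
--             for p in range(start, i):
--                 covered.add(p)
--             i = start
--         else:
--             i -= 1
--     return covered
-- ===== SOURCE B (Python) =====
-- KNOWN = set([
--     'AB', 'AM', 'AN', 'ALS', 'AUF', 'AUS', 'BEI', 'DA', 'DAS', 'DEM',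
--     'DEN', 'DER', 'DES', 'DIE', 'DU', 'ER', 'ES', 'IM', 'IN', 'IST',
--     'JA', 'MAN', 'OB', 'SO', 'UM', 'UND', 'VON', 'VOR', 'WO', 'ZU',
--     'EIN', 'ICH', 'SIE', 'WER', 'WIE', 'WAS', 'WIR',
--     'GEH', 'GIB', 'HAT', 'HIN', 'HER', 'NUN', 'NUR', 'SEI', 'TUN',
--     'SAG', 'WAR', 'ODE', 'SER', 'GEN', 'INS', 'MIN', 'OEL', 'SCE',
--     'ABER', 'ALLE', 'ALLES', 'ALTE', 'ALTEN', 'ALTER', 'AUCH', 'BAND',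
--     'BERG', 'BURG', 'DENN', 'DIES', 'DOCH', 'DORT', 'DREI', 'DURCH',
--     'EINE', 'EINEM', 'EINEN', 'EINER', 'EINES', 'ENDE', 'ERDE', 'ERST',
--     'ERSTE', 'FACH', 'FAND', 'FERN', 'FEST', 'FORT', 'GAR', 'GANZ',
--     'GEGEN', 'GEIST', 'GOTT', 'GOLD', 'GRAB', 'GROSS', 'GRUFT', 'GUT',
--     'HAND', 'HEIM', 'HELD', 'HERR', 'HIER', 'HOCH', 'IMMER', 'KANN', 'KLAR',
--     'KRAFT', 'LAND', 'LANG', 'LICHT', 'MACHT', 'MEHR', 'MUSS', 'NACH',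
--     'NACHT', 'NAHM', 'NAME', 'NEU', 'NEUE', 'NEUEN', 'NICHT', 'NIE', 'NOCH',
--     'ODER', 'ORT', 'ORTEN', 'REDE', 'REDEN', 'REICH', 'RIEF', 'RUIN', 'RUNE',
--     'RUNEN', 'SAND', 'SAGT', 'SCHAUN', 'SCHON', 'SEHR', 'SEID', 'SEIN',
--     'SEINE', 'SEINEN', 'SEINER', 'SEINEM', 'SEINES', 'SICH', 'SIND', 'SOHN',
--     'SOLL', 'STEH', 'STEIN', 'STEINE', 'STEINEN', 'STERN', 'TAG', 'TAGE',
--     'TAT', 'TEIL', 'TIEF', 'TOD', 'TURM', 'UNTER', 'URALTE', 'VIEL', 'VIER',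
--     'WAHR', 'WALD', 'WAND', 'WARD', 'WEIL', 'WELT', 'WENN', 'WERT',
--     'WESEN', 'WILL', 'WIND', 'WIRD', 'WORT', 'WORTE', 'ZEIT', 'ZEHN', 'ZORN',
--     'FINDEN', 'GEBEN', 'GEHEN', 'HABEN', 'KOMMEN', 'LEBEN', 'LESEN',
--     'NEHMEN', 'SAGEN', 'SEHEN', 'STEHEN', 'SUCHEN', 'WISSEN', 'WISSET',
--     'RUFEN', 'WIEDER', 'GEIGET', 'BERUCHTIG', 'BERUCHTIGER', 'MEERE',
--     'NEIGT', 'WISTEN', 'MANIER', 'HUND', 'GODE', 'EIGENTUM', 'REDER',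
--     'THENAEUT', 'LABT', 'MORT', 'DIGE', 'WEGE', 'KOENIGS', 'NAHE', 'NOT',
--     'NOTH', 'ZUR', 'OWI', 'ENGE', 'SEIDEN', 'ALTES', 'DENN', 'BIS', 'NIE',
--     'NUT', 'NUTZ', 'HEIL', 'NEID', 'TREU', 'TREUE', 'SUN', 'DIENST', 'SANG',
--     'DINC', 'HULDE', 'STEINE', 'KOENIG', 'DASS', 'EDEL', 'ADEL',
--     'SALZBERG', 'WEICHSTEIN', 'ORANGENSTRASSE', 'GOTTDIENER', 'GOTTDIENERS',
--     'TRAUT', 'LEICH', 'HEIME', 'SCHARDT', 'NACH', 'LANT', 'HERRE',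
-- ])
--
--
-- def dp_covered_positions(text):
--     """Returns set of positions covered by known words."""
--     n = len(text)
--     f = [0] * (n + 1)
--     for i in range(1, n + 1):
--         best = f[i - 1]
--         for wlen in range(2, min(i, 20) + 1):
--             if text[i - wlen:i] in KNOWN:
--                 s = f[i - wlen] + wlen
--                 if s > best:
--                     best = s
--         f[i] = best
--     covered = set()
--     i = n
--     while i > 0:
--         if f[i] == f[i - 1]:
--             i -= 1
--         else:
--             w = next(w for w in range(2, min(i, 20) + 1)
--                      if text[i - w:i] in KNOWN and f[i - w] + w == f[i])
--             covered.update(range(i - w, i))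
--             i -= w
--     return covered
-- ===== Notes on version B (the rewrite author's own statement) =====
-- stated objective: alternative
-- what changed: B's DP table stores only the integer scores (no backpointers); the backward reconstruction rediscovers, at each position whose score strictly improved, the first word length whose score matches, so the table payload and the reconstruction logic are different.
import Mathlib
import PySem

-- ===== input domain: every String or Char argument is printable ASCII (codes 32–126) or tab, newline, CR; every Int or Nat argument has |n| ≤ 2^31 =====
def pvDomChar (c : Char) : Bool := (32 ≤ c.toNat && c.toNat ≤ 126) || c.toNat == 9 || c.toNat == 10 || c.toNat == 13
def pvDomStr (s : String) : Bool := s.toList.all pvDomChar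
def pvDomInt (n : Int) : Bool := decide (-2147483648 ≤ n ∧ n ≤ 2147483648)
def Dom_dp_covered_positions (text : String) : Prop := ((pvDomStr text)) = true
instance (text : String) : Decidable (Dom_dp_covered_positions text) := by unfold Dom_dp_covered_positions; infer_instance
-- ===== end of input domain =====

-- B keeps only integer scores in the DP table (no backpointers) and, during the backward pass,
-- rediscovers the first word width whose score matches (objective: alternative decomposition).
-- Python returns a set (iteration order not modelled); both ports present it in ascending order.

-- ===== PORT A =====
-- the module constant KNOWN (a Python set of words; duplicates in the literal are harmless)
def pvKnown : List (List Char) :=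
  (["AB", "AM", "AN", "ALS", "AUF", "AUS", "BEI", "DA", "DAS", "DEM",
    "DEN", "DER", "DES", "DIE", "DU", "ER", "ES", "IM", "IN", "IST",
    "JA", "MAN", "OB", "SO", "UM", "UND", "VON", "VOR", "WO", "ZU",
    "EIN", "ICH", "SIE", "WER", "WIE", "WAS", "WIR",
    "GEH", "GIB", "HAT", "HIN", "HER", "NUN", "NUR", "SEI", "TUN",
    "SAG", "WAR", "ODE", "SER", "GEN", "INS", "MIN", "OEL", "SCE",
    "ABER", "ALLE", "ALLES", "ALTE", "ALTEN", "ALTER", "AUCH", "BAND",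
    "BERG", "BURG", "DENN", "DIES", "DOCH", "DORT", "DREI", "DURCH",
    "EINE", "EINEM", "EINEN", "EINER", "EINES", "ENDE", "ERDE", "ERST",
    "ERSTE", "FACH", "FAND", "FERN", "FEST", "FORT", "GAR", "GANZ",
    "GEGEN", "GEIST", "GOTT", "GOLD", "GRAB", "GROSS", "GRUFT", "GUT",
    "HAND", "HEIM", "HELD", "HERR", "HIER", "HOCH", "IMMER", "KANN", "KLAR",
    "KRAFT", "LAND", "LANG", "LICHT", "MACHT", "MEHR", "MUSS", "NACH",
    "NACHT", "NAHM", "NAME", "NEU", "NEUE", "NEUEN", "NICHT", "NIE", "NOCH",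
    "ODER", "ORT", "ORTEN", "REDE", "REDEN", "REICH", "RIEF", "RUIN", "RUNE",
    "RUNEN", "SAND", "SAGT", "SCHAUN", "SCHON", "SEHR", "SEID", "SEIN",
    "SEINE", "SEINEN", "SEINER", "SEINEM", "SEINES", "SICH", "SIND", "SOHN",
    "SOLL", "STEH", "STEIN", "STEINE", "STEINEN", "STERN", "TAG", "TAGE",
    "TAT", "TEIL", "TIEF", "TOD", "TURM", "UNTER", "URALTE", "VIEL", "VIER",
    "WAHR", "WALD", "WAND", "WARD", "WEIL", "WELT", "WENN", "WERT",
    "WESEN", "WILL", "WIND", "WIRD", "WORT", "WORTE", "ZEIT", "ZEHN", "ZORN",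
    "FINDEN", "GEBEN", "GEHEN", "HABEN", "KOMMEN", "LEBEN", "LESEN",
    "NEHMEN", "SAGEN", "SEHEN", "STEHEN", "SUCHEN", "WISSEN", "WISSET",
    "RUFEN", "WIEDER", "GEIGET", "BERUCHTIG", "BERUCHTIGER", "MEERE",
    "NEIGT", "WISTEN", "MANIER", "HUND", "GODE", "EIGENTUM", "REDER",
    "THENAEUT", "LABT", "MORT", "DIGE", "WEGE", "KOENIGS", "NAHE", "NOT",
    "NOTH", "ZUR", "OWI", "ENGE", "SEIDEN", "ALTES", "DENN", "BIS", "NIE",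
    "NUT", "NUTZ", "HEIL", "NEID", "TREU", "TREUE", "SUN", "DIENST", "SANG",
    "DINC", "HULDE", "STEINE", "KOENIG", "DASS", "EDEL", "ADEL",
    "SALZBERG", "WEICHSTEIN", "ORANGENSTRASSE", "GOTTDIENER", "GOTTDIENERS",
    "TRAUT", "LEICH", "HEIME", "SCHARDT", "NACH", "LANT", "HERRE"] : List String).map String.toList

-- inner loop body of A: for wlen in range(2, min(i,20)+1): …
def pvStepA (cs : List Char) (dp : List (Int × Option (Int × List Char))) (i : Int)
    (cur : Int × Option (Int × List Char)) (wlen : Int) : Int × Option (Int × List Char) :=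
  let start := i - wlen
  let cand := PySem.List.slice cs (some start) (some i)
  if pvKnown.contains cand then
    let score := (dp.getD start.toNat ((0 : Int), none)).1 + wlen
    if score > cur.1 then (score, some (start, cand)) else cur
  else cur

-- outer loop body of A: dp[i] = (dp[i-1][0], None); inner loop; (dp[i] kept locally as `cur`)
def pvOuterA (cs : List Char) (dp : List (Int × Option (Int × List Char))) (i : Int) :
    List (Int × Option (Int × List Char)) :=
  let cur0 : Int × Option (Int × List Char) := ((dp.getD (i - 1).toNat ((0 : Int), none)).1, none)
  dp.set i.toNat ((PySem.List.pyRange 2 (min i 20 + 1) 1).foldl (pvStepA cs dp i) cur0)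

def pvTableA (cs : List Char) (n : Nat) : List (Int × Option (Int × List Char)) :=
  (PySem.List.pyRange 1 ((n : Int) + 1) 1).foldl (pvOuterA cs)
    (List.replicate (n + 1) ((0 : Int), (none : Option (Int × List Char))))

-- the backward reconstruction while-loop; fuel bounds the number of iterations (i strictly
-- decreases each round, so fuel = n+1 is enough — a totality guard only, not an algorithm switch)
def pvBackA (dp : List (Int × Option (Int × List Char))) :
    Nat → Int → PySem.Set Int → PySem.Set Int
  | 0, _, covered => covered
  | fuel + 1, i, covered =>
    if i > 0 then
      match (dp.getD i.toNat ((0 : Int), none)).2 with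
      | some (start, _word) =>
          pvBackA dp fuel start
            ((PySem.List.pyRange start i 1).foldl (fun s p => PySem.Set.add s p) covered)
      | none => pvBackA dp fuel (i - 1) covered
    else covered

def dp_covered_positions (text : String) : List Int :=
  let cs := text.toList
  let n := cs.length
  PySem.List.sorted (pvBackA (pvTableA cs n) (n + 1) (n : Int) PySem.Set.empty) (fun x => x) false

-- ===== PORT B =====
-- inner loop body of B: only the best score is maintained
def pvBestB (cs : List Char) (f : List Int) (i : Int) (best : Int) (wlen : Int) : Int :=
  if pvKnown.contains (PySem.List.slice cs (some (i - wlen)) (some i)) then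
    let s := f.getD (i - wlen).toNat 0 + wlen
    if s > best then s else best
  else best

-- forward pass of B: f[i] = best
def pvScoresB (cs : List Char) (n : Nat) : List Int :=
  (PySem.List.pyRange 1 ((n : Int) + 1) 1).foldl
    (fun f i =>
      f.set i.toNat
        ((PySem.List.pyRange 2 (min i 20 + 1) 1).foldl (pvBestB cs f i) (f.getD (i - 1).toNat 0)))
    (List.replicate (n + 1) (0 : Int))

-- backward pass of B; fuel is a totality guard only (i strictly decreases each round).
-- `next(w for w in … if …)` is the first matching width: List.find?; the generator always
-- finds one when f[i] ≠ f[i-1] (proved below), so the `getD 0` default is never used.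
def pvBackB (cs : List Char) (f : List Int) : Nat → Int → PySem.Set Int → PySem.Set Int
  | 0, _, covered => covered
  | fuel + 1, i, covered =>
    if i > 0 then
      if f.getD i.toNat 0 == f.getD (i - 1).toNat 0 then
        pvBackB cs f fuel (i - 1) covered
      else
        let w := ((PySem.List.pyRange 2 (min i 20 + 1) 1).find? (fun w =>
            pvKnown.contains (PySem.List.slice cs (some (i - w)) (some i)) &&
            (f.getD (i - w).toNat 0 + w == f.getD i.toNat 0))).getD 0
        pvBackB cs f fuel (i - w) (PySem.Set.update covered (PySem.List.pyRange (i - w) i 1))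
    else covered

def dp_covered_positions_alt (text : String) : List Int :=
  let cs := text.toList
  let n := cs.length
  PySem.List.sorted (pvBackB cs (pvScoresB cs n) (n + 1) (n : Int) PySem.Set.empty)
    (fun x => x) false

-- ===== PRECONDITION & SPEC =====
def Spec_dp_covered_positions (text : String) (out : List Int) : Prop := out = dp_covered_positions_alt text
instance (text : String) (out : List Int) : Decidable (Spec_dp_covered_positions text out) := by unfold Spec_dp_covered_positions; infer_instance

-- ===== CLAIM (what is proved, stated in full; the proofs are below) =====
def Claim_equal_dp_covered_positions : Prop := ∀ (text : String), Dom_dp_covered_positions text → Spec_dp_covered_positions text (dp_covered_positions text)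

-- ===== LEMMAS AND PROOFS =====

-- reads with defaults
def pvGA (TA : List (Int × Option (Int × List Char))) (j : Nat) : Int × Option (Int × List Char) :=
  TA.getD j ((0 : Int), none)
def pvGB (F : List Int) (j : Nat) : Int := F.getD j 0

theorem pv_getD_set_self {α : Type} (l : List α) (i : Nat) (h : i < l.length) (v d : α) :
    (l.set i v).getD i d = v := by
  simp [List.getD, h]

theorem pv_getD_set_ne {α : Type} (l : List α) (i j : Nat) (h : i ≠ j) (v d : α) :
    (l.set i v).getD j d = l.getD j d := by
  simp [List.getD, h]

theorem pv_find?_congr {α : Type} (L : List α) (p q : α → Bool)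
    (h : ∀ x ∈ L, p x = q x) : L.find? p = L.find? q := by
  induction L with
  | nil => rfl
  | cons x L ih =>
    simp only [List.find?_cons, h x List.mem_cons_self]
    cases q x
    · exact ih (fun y hy => h y (List.mem_cons_of_mem _ hy))
    · rfl

-- abstract versions of the two inner-loop bodies (pvStepA / pvBestB with the table reads abstracted)
def pvAbsA (known : Int → Bool) (score : Int → Int) (tag : Int → Int × List Char)
    (cur : Int × Option (Int × List Char)) (w : Int) : Int × Option (Int × List Char) :=
  if known w then (if score w > cur.1 then (score w, some (tag w)) else cur) else cur

def pvAbsB (known : Int → Bool) (score : Int → Int) (best : Int) (w : Int) : Int :=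
  if known w then (if score w > best then score w else best) else best

-- joint characterisation of A's inner fold (score + backpointer) and B's inner fold (score only):
-- equal scores; the backpointer is none iff no improvement, otherwise it is the FIRST width whose
-- score equals the final score (which is what B's find? recomputes)
theorem pvFoldChar (known : Int → Bool) (score : Int → Int) (tag : Int → Int × List Char)
    (b : Int) (L : List Int) :
    (L.foldl (pvAbsA known score tag) (b, none)).1 = L.foldl (pvAbsB known score) b ∧
    b ≤ L.foldl (pvAbsB known score) b ∧
    (∀ w ∈ L, known w = true → score w ≤ L.foldl (pvAbsB known score) b) ∧
    (((L.foldl (pvAbsA known score tag) (b, none)).2 = none ∧ L.foldl (pvAbsB known score) b = b) ∨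
     (b < L.foldl (pvAbsB known score) b ∧ ∃ w,
        L.find? (fun w => known w && (score w == L.foldl (pvAbsB known score) b)) = some w ∧
        (L.foldl (pvAbsA known score tag) (b, none)).2 = some (tag w))) := by
  induction L using List.reverseRecOn with
  | nil => exact ⟨rfl, le_refl _, by simp, Or.inl ⟨rfl, rfl⟩⟩
  | append_singleton L w ih =>
    obtain ⟨h1, h2, h3, h4⟩ := ih
    rw [List.foldl_append, List.foldl_append]
    simp only [List.foldl_cons, List.foldl_nil]
    by_cases hk : known w = true
    · by_cases hgt : score w > L.foldl (pvAbsB known score) b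
      · have hstepB : pvAbsB known score (L.foldl (pvAbsB known score) b) w = score w := by
          simp [pvAbsB, hk, hgt]
        have hstepA : pvAbsA known score tag (L.foldl (pvAbsA known score tag) (b, none)) w
            = (score w, some (tag w)) := by
          simp only [pvAbsA, hk, if_pos, h1]
          rw [if_pos hgt]
        rw [hstepA, hstepB]
        refine ⟨rfl, by omega, ?_, Or.inr ⟨by omega, w, ?_, rfl⟩⟩
        · intro v hv hkv
          rcases List.mem_append.1 hv with hv | hv
          · have := h3 v hv hkv; omega
          · rw [List.mem_singleton.1 hv]
        · rw [List.find?_append]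
          have hnone : L.find? (fun v => known v && (score v == score w)) = none := by
            refine List.find?_eq_none.mpr ?_
            intro v hv
            by_cases hkv : known v = true
            · have := h3 v hv hkv
              simp [hkv, show ¬ score v = score w by omega]
            · simp [hkv]
          rw [hnone]
          simp [hk]
      · have hstepB : pvAbsB known score (L.foldl (pvAbsB known score) b) w
            = L.foldl (pvAbsB known score) b := by
          simp only [pvAbsB, hk, if_pos]
          rw [if_neg hgt]
        have hstepA : pvAbsA known score tag (L.foldl (pvAbsA known score tag) (b, none)) w
            = L.foldl (pvAbsA known score tag) (b, none) := by
          simp only [pvAbsA, hk, if_pos, h1]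
          rw [if_neg hgt]
        rw [hstepA, hstepB]
        refine ⟨h1, h2, ?_, ?_⟩
        · intro v hv hkv
          rcases List.mem_append.1 hv with hv | hv
          · exact h3 v hv hkv
          · rw [List.mem_singleton.1 hv]; omega
        · rcases h4 with ⟨hn, hs⟩ | ⟨hb, w0, hf, htag⟩
          · exact Or.inl ⟨hn, hs⟩
          · refine Or.inr ⟨hb, w0, ?_, htag⟩
            rw [List.find?_append, hf]; rfl
    · have hstepB : pvAbsB known score (L.foldl (pvAbsB known score) b) w
          = L.foldl (pvAbsB known score) b := by simp [pvAbsB, hk]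
      have hstepA : pvAbsA known score tag (L.foldl (pvAbsA known score tag) (b, none)) w
          = L.foldl (pvAbsA known score tag) (b, none) := by simp [pvAbsA, hk]
      rw [hstepA, hstepB]
      refine ⟨h1, h2, ?_, ?_⟩
      · intro v hv hkv
        rcases List.mem_append.1 hv with hv | hv
        · exact h3 v hv hkv
        · rw [List.mem_singleton.1 hv] at hkv; exact absurd hkv hk
      · rcases h4 with ⟨hn, hs⟩ | ⟨hb, w0, hf, htag⟩
        · exact Or.inl ⟨hn, hs⟩
        · refine Or.inr ⟨hb, w0, ?_, htag⟩
          rw [List.find?_append, hf]; rfl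

-- the joint table invariant after processing positions 1..m
def pvInv (cs : List Char) (n m : Nat) (TA : List (Int × Option (Int × List Char)))
    (F : List Int) : Prop :=
  TA.length = n + 1 ∧ F.length = n + 1 ∧
  (∀ j : Nat, j ≤ m → pvGB F j = (pvGA TA j).1) ∧
  (∀ j : Nat, 1 ≤ j → j ≤ m → ((pvGA TA j).2 = none ↔ (pvGA TA j).1 = (pvGA TA (j - 1)).1)) ∧
  (∀ j : Nat, 1 ≤ j → j ≤ m → ∀ s word, (pvGA TA j).2 = some (s, word) →
    ∃ w : Int, ((PySem.List.pyRange 2 (min (j : Int) 20 + 1) 1).find? (fun w =>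
        pvKnown.contains (PySem.List.slice cs (some ((j : Int) - w)) (some (j : Int))) &&
        (pvGB F ((j : Int) - w).toNat + w == pvGB F j))) = some w ∧ s = (j : Int) - w)

theorem pvInv_step (cs : List Char) (n m : Nat) (TA : List (Int × Option (Int × List Char)))
    (F : List Int) (h : pvInv cs n m TA F) (hm : m + 1 ≤ n) :
    pvInv cs n (m + 1) (pvOuterA cs TA ((m : Int) + 1))
      (F.set ((m : Int) + 1).toNat
        ((PySem.List.pyRange 2 (min ((m : Int) + 1) 20 + 1) 1).foldl
          (pvBestB cs F ((m : Int) + 1)) (F.getD (((m : Int) + 1) - 1).toNat 0))) := by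
  obtain ⟨hlA, hlF, h3, h4, h5⟩ := h
  set i : Int := (m : Int) + 1 with hidef
  have hiN : i.toNat = m + 1 := by omega
  have hi1 : (i - 1).toNat = m := by omega
  set known : Int → Bool := fun w =>
    pvKnown.contains (PySem.List.slice cs (some (i - w)) (some i)) with hknown
  set scoreA : Int → Int := fun w => (pvGA TA (i - w).toNat).1 + w with hscoreA
  set tag : Int → Int × List Char := fun w =>
    (i - w, PySem.List.slice cs (some (i - w)) (some i)) with htag
  set L : List Int := PySem.List.pyRange 2 (min i 20 + 1) 1 with hL
  set b : Int := (pvGA TA m).1 with hb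
  have hLmem : ∀ w ∈ L, 2 ≤ w ∧ w ≤ min i 20 := by
    intro w hw
    have := (PySem.List.mem_pyRange_one).1 hw
    constructor <;> omega
  have hstepAB : pvStepA cs TA i = pvAbsA known scoreA tag := by
    funext cur w; rfl
  have hcur0 : ((TA.getD (i - 1).toNat ((0 : Int), none)).1,
      (none : Option (Int × List Char))) = ((b, none) : Int × Option (Int × List Char)) := by
    rw [hi1]; rfl
  have hfoldB : L.foldl (pvBestB cs F i) (F.getD (i - 1).toNat 0)
      = L.foldl (pvAbsB known scoreA) b := by
    have hinit : F.getD (i - 1).toNat 0 = b := by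
      rw [hi1]; exact h3 m le_rfl
    rw [hinit]
    refine PySem.List.foldl_congr_mem _ _ _ _ ?_
    intro acc w hw
    obtain ⟨hw2, hwi⟩ := hLmem w hw
    have hidx : (i - w).toNat ≤ m := by omega
    have hread : F.getD (i - w).toNat 0 = (pvGA TA (i - w).toNat).1 := h3 _ hidx
    simp only [pvBestB, pvAbsB, hscoreA]
    rw [hread]
  obtain ⟨q1, q2, q3, q4⟩ := pvFoldChar known scoreA tag b L
  set rA := L.foldl (pvAbsA known scoreA tag) (b, none) with hrA
  set sB := L.foldl (pvAbsB known scoreA) b with hsB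
  have hTA' : pvOuterA cs TA i = TA.set (m + 1) rA := by
    simp only [pvOuterA]
    rw [hcur0, hstepAB, hiN]
  have hF' : F.set i.toNat (L.foldl (pvBestB cs F i) (F.getD (i - 1).toNat 0))
      = F.set (m + 1) sB := by
    rw [hfoldB, hiN]
  rw [hTA', hF']
  have hmlt : m + 1 < TA.length := by omega
  have hmltF : m + 1 < F.length := by omega
  have gA' : ∀ j : Nat, j ≠ m + 1 → pvGA (TA.set (m + 1) rA) j = pvGA TA j := by
    intro j hj
    exact pv_getD_set_ne _ _ _ (fun hc => hj hc.symm) _ _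
  have gA'' : pvGA (TA.set (m + 1) rA) (m + 1) = rA := pv_getD_set_self _ _ hmlt _ _
  have gB' : ∀ j : Nat, j ≠ m + 1 → pvGB (F.set (m + 1) sB) j = pvGB F j := by
    intro j hj
    exact pv_getD_set_ne _ _ _ (fun hc => hj hc.symm) _ _
  have gB'' : pvGB (F.set (m + 1) sB) (m + 1) = sB := pv_getD_set_self _ _ hmltF _ _
  have hcast : ((m + 1 : Nat) : Int) = i := by push_cast; omega
  refine ⟨by simpa using hlA, by simpa using hlF, ?_, ?_, ?_⟩
  · intro j hj
    rcases Nat.lt_or_ge j (m + 1) with hlt | hge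
    · rw [gA' j (by omega), gB' j (by omega)]
      exact h3 j (by omega)
    · have hj' : j = m + 1 := by omega
      subst hj'
      rw [gA'', gB'', q1]
  · intro j h1j hjm
    rcases Nat.lt_or_ge j (m + 1) with hlt | hge
    · rw [gA' j (by omega), gA' (j - 1) (by omega)]
      exact h4 j h1j (by omega)
    · have hj' : j = m + 1 := by omega
      subst hj'
      rw [gA'', show m + 1 - 1 = m from rfl, gA' m (by omega)]
      constructor
      · intro hn
        rcases q4 with ⟨_, hs⟩ | ⟨_, w0, _, htg⟩
        · rw [q1, hs]
        · rw [htg] at hn; exact absurd hn (by simp)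
      · intro he
        rcases q4 with ⟨hn, _⟩ | ⟨hlt2, _⟩
        · exact hn
        · rw [q1] at he; omega
  · intro j h1j hjm s word hsw
    rcases Nat.lt_or_ge j (m + 1) with hlt | hge
    · rw [gA' j (by omega)] at hsw
      obtain ⟨w, hf, hseq⟩ := h5 j h1j (by omega) s word hsw
      refine ⟨w, ?_, hseq⟩
      rw [← hf]
      refine pv_find?_congr _ _ _ ?_
      intro x hx
      have := (PySem.List.mem_pyRange_one).1 hx
      have hx2 : 2 ≤ x ∧ x ≤ min (j : Int) 20 := by constructor <;> omega
      have hidx : ((j : Int) - x).toNat ≠ m + 1 := by omega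
      rw [gB' _ hidx, gB' j (by omega)]
    · have hj' : j = m + 1 := by omega
      subst hj'
      rw [gA''] at hsw
      rcases q4 with ⟨hn, _⟩ | ⟨hlt2, w0, hf, htg⟩
      · rw [hsw] at hn; exact absurd hn (by simp)
      · rw [htg] at hsw
        have hs : s = i - w0 := by
          have h2 := hsw
          simp only [htag, Option.some.injEq, Prod.mk.injEq] at h2
          exact h2.1.symm
        refine ⟨w0, ?_, by rw [hcast]; exact hs⟩
        rw [hcast, ← hf]
        refine pv_find?_congr _ _ _ ?_
        intro x hx
        obtain ⟨hx2, hxi⟩ := hLmem x hx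
        have hidx : (i - x).toNat ≠ m + 1 := by omega
        have hidx2 : (i - x).toNat ≤ m := by omega
        rw [gB' _ hidx, gB'', h3 _ hidx2]

theorem pvInv_table (cs : List Char) (n : Nat) : ∀ (m : Nat), m ≤ n →
    pvInv cs n m
      ((PySem.List.pyRange 1 ((m : Int) + 1) 1).foldl (pvOuterA cs)
        (List.replicate (n + 1) ((0 : Int), (none : Option (Int × List Char)))))
      ((PySem.List.pyRange 1 ((m : Int) + 1) 1).foldl
        (fun f i => f.set i.toNat
          ((PySem.List.pyRange 2 (min i 20 + 1) 1).foldl (pvBestB cs f i) (f.getD (i - 1).toNat 0)))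
        (List.replicate (n + 1) (0 : Int))) := by
  intro m
  induction m with
  | zero =>
    intro _
    rw [PySem.List.pyRange_one_eq_nil (by omega)]
    refine ⟨by simp, by simp, ?_, ?_, ?_⟩
    · intro j _
      simp [pvGA, pvGB]
    · intro j h1 h0; omega
    · intro j h1 h0; omega
  | succ m ih =>
    intro hm
    have hsplit : PySem.List.pyRange 1 (((m + 1 : Nat) : Int) + 1) 1
        = PySem.List.pyRange 1 ((m : Int) + 1) 1 ++ [(m : Int) + 1] := by
      have h2 := PySem.List.pyRange_one_succ_right (a := 1) (b := (m : Int) + 1) (by omega)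
      rw [show (((m + 1 : Nat) : Int) + 1) = ((m : Int) + 1) + 1 by push_cast; ring]
      exact h2
    rw [hsplit, List.foldl_append, List.foldl_append]
    simp only [List.foldl_cons, List.foldl_nil]
    exact pvInv_step cs n m _ _ (ih (by omega)) hm

-- the two backward passes take identical steps
theorem pvBackEq (cs : List Char) (n : Nat) (TA : List (Int × Option (Int × List Char)))
    (F : List Int) (h : pvInv cs n n TA F) :
    ∀ (fuel : Nat) (i : Int), i ≤ (n : Int) → ∀ (covered : PySem.Set Int),
      pvBackA TA fuel i covered = pvBackB cs F fuel i covered := by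
  obtain ⟨hlA, hlF, h3, h4, h5⟩ := h
  intro fuel
  induction fuel with
  | zero => intro i _ covered; rfl
  | succ fuel ih =>
    intro i hin covered
    by_cases hpos : i > 0
    · have hj1 : 1 ≤ i.toNat := by omega
      have hjn : i.toNat ≤ n := by omega
      have hcast : ((i.toNat : Nat) : Int) = i := by omega
      have hfi : pvGB F i.toNat = (pvGA TA i.toNat).1 := h3 _ hjn
      have hfi1 : pvGB F (i - 1).toNat = (pvGA TA (i.toNat - 1)).1 := by
        rw [show (i - 1).toNat = i.toNat - 1 by omega]
        exact h3 _ (by omega)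
      rcases hbp : (pvGA TA i.toNat).2 with _ | ⟨s, word⟩
      · have heq : (pvGA TA i.toNat).1 = (pvGA TA (i.toNat - 1)).1 :=
          (h4 i.toNat hj1 hjn).1 hbp
        have hbeq : (F.getD i.toNat 0 == F.getD (i - 1).toNat 0) = true := by
          refine beq_iff_eq.mpr ?_
          show pvGB F i.toNat = pvGB F (i - 1).toNat
          rw [hfi, hfi1, heq]
        have hAe : pvBackA TA (fuel + 1) i covered = pvBackA TA fuel (i - 1) covered := by
          simp only [pvBackA, if_pos hpos]
          rw [show (TA.getD i.toNat ((0 : Int), none)).2 = none from hbp]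
        have hBe : pvBackB cs F (fuel + 1) i covered = pvBackB cs F fuel (i - 1) covered := by
          simp only [pvBackB, if_pos hpos]
          rw [if_pos hbeq]
        rw [hAe, hBe]
        exact ih (i - 1) (by omega) covered
      · obtain ⟨w, hf, hsw⟩ := h5 i.toNat hj1 hjn s word hbp
        rw [hcast] at hf hsw
        simp only [pvGB] at hf
        have hwmem := List.mem_of_find?_eq_some hf
        obtain ⟨hw2, hwlt⟩ := (PySem.List.mem_pyRange_one).1 hwmem
        have hne : (F.getD i.toNat 0 == F.getD (i - 1).toNat 0) = false := by
          refine beq_eq_false_iff_ne.mpr ?_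
          show pvGB F i.toNat ≠ pvGB F (i - 1).toNat
          rw [hfi, hfi1]
          intro hc
          have := (h4 i.toNat hj1 hjn).2 hc
          rw [hbp] at this
          exact absurd this (by simp)
        have hAe : pvBackA TA (fuel + 1) i covered
            = pvBackA TA fuel s
                ((PySem.List.pyRange s i 1).foldl (fun t p => PySem.Set.add t p) covered) := by
          simp only [pvBackA, if_pos hpos]
          rw [show (TA.getD i.toNat ((0 : Int), none)).2 = some (s, word) from hbp]
        have hBe : pvBackB cs F (fuel + 1) i covered
            = pvBackB cs F fuel (i - w)
                (PySem.Set.update covered (PySem.List.pyRange (i - w) i 1)) := by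
          simp only [pvBackB, if_pos hpos]
          rw [if_neg (by rw [hne]; simp), hf, Option.getD_some]
        rw [hAe, hBe, hsw]
        rw [show (PySem.List.pyRange (i - w) i 1).foldl (fun t p => PySem.Set.add t p) covered
            = PySem.Set.update covered (PySem.List.pyRange (i - w) i 1) from rfl]
        exact ih (i - w) (by omega) _
    · simp only [pvBackA, pvBackB, if_neg hpos]

-- ===== VERDICT (by name: the statement is the Claim_ definition above) =====
theorem dp_covered_positions_spec : Claim_equal_dp_covered_positions := by
  intro text _
  show dp_covered_positions text = dp_covered_positions_alt text
  have h : pvInv text.toList text.toList.length text.toList.length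
      (pvTableA text.toList text.toList.length) (pvScoresB text.toList text.toList.length) :=
    pvInv_table text.toList text.toList.length text.toList.length le_rfl
  show PySem.List.sorted
      (pvBackA (pvTableA text.toList text.toList.length) (text.toList.length + 1)
        (text.toList.length : Int) PySem.Set.empty) (fun x => x) false
    = PySem.List.sorted
      (pvBackB text.toList (pvScoresB text.toList text.toList.length) (text.toList.length + 1)
        (text.toList.length : Int) PySem.Set.empty) (fun x => x) false
  rw [pvBackEq text.toList text.toList.length _ _ h (text.toList.length + 1)
    (text.toList.length : Int) le_rfl PySem.Set.empty]
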